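-- pv_equiv track=rewrite | github.com/mikeP-1107/artificial-intelligence | Naive_Bayes/bayes.py | divide_classes
-- ===== SOURCE A (Python) =====
-- def divide_classes(data):
-- 	class_lists = dict()
-- 	for i in range(len(data)):
-- 		current_val = data[i]
-- 		class_value = current_val[-1]
-- 		if (class_value not in class_lists):
-- 			class_lists[class_value] = list()
-- 		class_lists[class_value].append(current_val[0])
-- 	return class_lists
-- ===== SOURCE B (Python) =====
-- def divide_classes(data):
--     labels = dict.fromkeys(row[-1] for row in data)
--     return {label: [row[0] for row in data if row[-1] == label] for label in labels}
-- ===== Notes on version B (the rewrite author's own statement) =====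
-- stated objective: simpler
-- what changed: Replaces A's single indexed pass that mutates per-key lists in a dict by: collect the distinct labels in first-seen order (dict.fromkeys), then one filtered scan of the data per label.
import Mathlib
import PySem

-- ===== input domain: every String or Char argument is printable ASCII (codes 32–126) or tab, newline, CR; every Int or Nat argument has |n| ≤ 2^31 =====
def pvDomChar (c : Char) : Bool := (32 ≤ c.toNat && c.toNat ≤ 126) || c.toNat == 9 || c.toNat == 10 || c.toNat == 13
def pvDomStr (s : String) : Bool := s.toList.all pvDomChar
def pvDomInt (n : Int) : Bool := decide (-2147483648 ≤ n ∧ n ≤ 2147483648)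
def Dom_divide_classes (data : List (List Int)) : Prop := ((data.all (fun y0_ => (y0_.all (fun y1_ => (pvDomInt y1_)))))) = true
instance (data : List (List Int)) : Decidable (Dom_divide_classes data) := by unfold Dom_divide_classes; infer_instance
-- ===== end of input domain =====

-- B replaces A's single indexed dict-building pass by "collect the distinct labels, then one
-- filtered scan of the data per label" (simpler/alternative shape, same exact result).

-- ===== PORT A =====
-- A: for i in range(len(data)): row = data[i]; key = row[-1]; ensure key in dict with []; append row[0].
def divide_classes (data : List (List Int)) : List (Int × List Int) :=
  (data.foldl (fun class_lists current_val =>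
      let class_value := PySem.List.pyGetD current_val (-1) 0
      let class_lists :=
        if class_lists.contains class_value then class_lists
        else class_lists.insert class_value []
      class_lists.modify class_value []
        (fun l => l ++ [PySem.List.pyGetD current_val 0 0]))
    PySem.Dict.empty).items

-- ===== PORT B =====
-- B: labels = dict.fromkeys(row[-1] for row in data)  (= ordered dedup, PySem.List.dedup);
--    then {label: [row[0] for row in data if row[-1] == label] for label in labels}.
def divide_classes_alt (data : List (List Int)) : List (Int × List Int) :=
  let labels := PySem.List.dedup (data.map (fun row => PySem.List.pyGetD row (-1) 0))
  labels.map (fun label =>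
    (label,
      (data.filter (fun row => PySem.List.pyGetD row (-1) 0 == label)).map
        (fun row => PySem.List.pyGetD row 0 0)))

-- ===== PRECONDITION & SPEC =====
-- Pre_ excludes inputs containing an empty row, on which Python A raises IndexError at row[-1].
def Pre_divide_classes (data : List (List Int)) : Prop := ∀ row ∈ data, row ≠ []
instance (data : List (List Int)) : Decidable (Pre_divide_classes data) := by unfold Pre_divide_classes; infer_instance
def pvWitness_divide_classes : List (List Int) := [[1, 0], [2, 1], [3, 0]]
def Spec_divide_classes (data : List (List Int)) (out : List (Int × List Int)) : Prop := out = divide_classes_alt data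
instance (data : List (List Int)) (out : List (Int × List Int)) : Decidable (Spec_divide_classes data out) := by unfold Spec_divide_classes; infer_instance

-- ===== CLAIM (what is proved, stated in full; the proofs are below) =====
def Claim_equal_divide_classes : Prop := ∀ (data : List (List Int)), Dom_divide_classes data → Pre_divide_classes data → Spec_divide_classes data (divide_classes data)

-- ===== LEMMAS AND PROOFS =====

-- the label and first-feature of a row, as both ports read them
def pvKey (row : List Int) : Int := PySem.List.pyGetD row (-1) 0
def pvVal (row : List Int) : Int := PySem.List.pyGetD row 0 0

-- A's loop body ('if key not in dict: dict[key] = []' then append) is a single Dict.modify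
theorem pvStepA_eq_modify (d : PySem.Dict Int (List Int)) (row : List Int) :
    (let class_value := PySem.List.pyGetD row (-1) 0
     let d' := if d.contains class_value then d else d.insert class_value []
     d'.modify class_value [] (fun l => l ++ [PySem.List.pyGetD row 0 0]))
    = d.modify (pvKey row) [] (fun l => l ++ [pvVal row]) := by
  by_cases h : d.contains (pvKey row) = true
  · simp only [pvKey] at h
    simp only [pvKey, pvVal, if_pos h]
  · simp only [pvKey] at h
    simp only [pvKey, pvVal, if_neg h, PySem.Dict.modify, PySem.Dict.getD_insert_self,
      PySem.Dict.insert_insert_self]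
    rw [PySem.Dict.getD_of_not_contains d [] (eq_false_of_ne_true h)]

theorem pvFoldA_eq (data : List (List Int)) :
    (data.foldl (fun class_lists current_val =>
        let class_value := PySem.List.pyGetD current_val (-1) 0
        let class_lists :=
          if class_lists.contains class_value then class_lists
          else class_lists.insert class_value []
        class_lists.modify class_value []
          (fun l => l ++ [PySem.List.pyGetD current_val 0 0]))
      PySem.Dict.empty)
    = data.foldl (fun d row => d.modify (pvKey row) [] (fun l => l ++ [pvVal row]))
        PySem.Dict.empty := by
  congr 1
  funext d row
  exact pvStepA_eq_modify d row

theorem divide_classes_spec : Claim_equal_divide_classes := by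
  intro data _ _
  unfold Spec_divide_classes divide_classes divide_classes_alt
  rw [pvFoldA_eq]
  set D := data.foldl (fun d row => d.modify (pvKey row) [] (fun l => l ++ [pvVal row]))
      PySem.Dict.empty with hD
  have hnd : D.keys.Nodup := by
    rw [hD]
    exact PySem.Dict.nodup_keys_foldl_modify_key data pvKey []
      (fun _ row l => l ++ [pvVal row]) PySem.Dict.empty (by simp)
  have hkeys : D.keys = PySem.List.dedup (data.map pvKey) := by
    rw [hD, PySem.Dict.keys_foldl_modify_key data pvKey [] (fun _ row l => l ++ [pvVal row])]
    simp [PySem.Set.update_nil_left, PySem.List.dedup_eq_ofList]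
  have hgetD : ∀ c, D.getD c [] =
      (data.filter (fun row => pvKey row == c)).map pvVal := by
    intro c
    have hmap : D = ((data.map (fun row => (pvKey row, pvVal row))).foldl
        (fun d p => d.modify p.1 [] (fun l => l ++ [p.2])) PySem.Dict.empty) := by
      rw [hD, List.foldl_map]
    rw [hmap, PySem.Dict.getD_foldl_modify_append]
    simp [List.filter_map, List.map_map, Function.comp_def]
  rw [PySem.Dict.items_eq_map_keys D hnd [], hkeys]
  refine List.map_congr_left (fun k _ => ?_)
  rw [hgetD k]
  rfl
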